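-- pv_equiv track=rewrite | github.com/BereniceAlexiaJocteur/Euler | pb321.py | solve
-- ===== SOURCE A (Python) =====
-- def solve(m):
--     x1 = 2
--     y1 = 1
--     x2 = 5
--     y2 = 3
--     count = 2
--     somme = 4
--     while count < m:
--         x1, y1 = 3*x1+4*y1+5, 2*x1+3*y1+3
--         x2, y2 = 3*x2+4*y2+5, 2*x2+3*y2+3
--         count += 2
--         somme += y1 + y2
--     return somme
-- ===== SOURCE B (Python) =====
-- def solve(m):
--     # Aggregate the two Pell orbits: u = x1+x2, v = y1+y2 evolve by
--     # u' = 3u+4v+10, v' = 2u+3v+6, and the running sum s by s' = s + v'.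
--     # One loop step is the affine map on (u, v, s), i.e. a linear map on
--     # (u, v, s, 1); raise its 4x4 matrix to the n-th power by binary
--     # exponentiation, where n is the number of iterations A's loop makes.
--     n = (m - 1) // 2
--     if n < 0:
--         n = 0
--     M = ((3, 4, 0, 10),
--          (2, 3, 0, 6),
--          (2, 3, 1, 6),
--          (0, 0, 0, 1))
--     R = ((1, 0, 0, 0),
--          (0, 1, 0, 0),
--          (0, 0, 1, 0),
--          (0, 0, 0, 1))
--     while n > 0:
--         if n % 2 == 1:
--             R = mat_mul(R, M)
--         M = mat_mul(M, M)
--         n = n // 2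
--     # initial state: u = 2+5, v = 1+3, s = 4; answer is the s component
--     return R[2][0] * 7 + R[2][1] * 4 + R[2][2] * 4 + R[2][3]
--
--
-- def mat_mul(A, B):
--     return tuple(
--         tuple(sum(A[i][k] * B[k][j] for k in range(4)) for j in range(4))
--         for i in range(4)
--     )
-- ===== Notes on version B (the rewrite author's own statement) =====
-- stated objective: faster
-- what changed: Replaces the O(m) step-by-step loop by binary exponentiation of the 4x4 matrix of one aggregated loop step (u=x1+x2, v=y1+y2, running sum as homogeneous coordinates), computing the same sum in O(log m) matrix multiplications.
import Mathlib
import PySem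

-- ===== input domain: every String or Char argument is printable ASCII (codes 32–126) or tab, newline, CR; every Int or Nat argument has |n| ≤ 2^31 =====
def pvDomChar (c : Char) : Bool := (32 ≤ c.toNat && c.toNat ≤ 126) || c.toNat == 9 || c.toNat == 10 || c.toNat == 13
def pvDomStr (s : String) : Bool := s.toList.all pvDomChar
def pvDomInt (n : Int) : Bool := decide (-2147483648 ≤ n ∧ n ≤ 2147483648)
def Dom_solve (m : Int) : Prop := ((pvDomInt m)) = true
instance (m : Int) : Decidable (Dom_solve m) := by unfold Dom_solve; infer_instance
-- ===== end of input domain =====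

-- B replaces A's O(m) step-by-step loop by binary exponentiation of the 4x4 matrix of
-- one aggregated loop step (u = x1+x2, v = y1+y2, sum), O(log m) matrix multiplications.

-- ===== PORT A =====
def solveLoop (m x1 y1 x2 y2 count somme : Int) : Int :=
  if count < m then
    solveLoop m (3*x1+4*y1+5) (2*x1+3*y1+3) (3*x2+4*y2+5) (2*x2+3*y2+3)
      (count + 2) (somme + (2*x1+3*y1+3) + (2*x2+3*y2+3))
  else somme
termination_by (m - count).toNat
decreasing_by omega

def solve (m : Int) : Int := solveLoop m 2 1 5 3 2 4

-- ===== PORT B =====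
abbrev Vec4 : Type := Int × Int × Int × Int
abbrev Mat4 : Type := Vec4 × Vec4 × Vec4 × Vec4

def matMul (A B : Mat4) : Mat4 :=
  match A, B with
  | ((a00,a01,a02,a03),(a10,a11,a12,a13),(a20,a21,a22,a23),(a30,a31,a32,a33)),
    ((b00,b01,b02,b03),(b10,b11,b12,b13),(b20,b21,b22,b23),(b30,b31,b32,b33)) =>
    ((a00*b00+a01*b10+a02*b20+a03*b30, a00*b01+a01*b11+a02*b21+a03*b31, a00*b02+a01*b12+a02*b22+a03*b32, a00*b03+a01*b13+a02*b23+a03*b33),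
     (a10*b00+a11*b10+a12*b20+a13*b30, a10*b01+a11*b11+a12*b21+a13*b31, a10*b02+a11*b12+a12*b22+a13*b32, a10*b03+a11*b13+a12*b23+a13*b33),
     (a20*b00+a21*b10+a22*b20+a23*b30, a20*b01+a21*b11+a22*b21+a23*b31, a20*b02+a21*b12+a22*b22+a23*b32, a20*b03+a21*b13+a22*b23+a23*b33),
     (a30*b00+a31*b10+a32*b20+a33*b30, a30*b01+a31*b11+a32*b21+a33*b31, a30*b02+a31*b12+a32*b22+a33*b32, a30*b03+a31*b13+a32*b23+a33*b33))

def powLoop (n : Int) (M R : Mat4) : Mat4 :=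
  if n > 0 then
    powLoop (PySem.Int.floordiv n 2) (matMul M M)
      (if PySem.Int.mod n 2 == 1 then matMul R M else R)
  else R
termination_by n.toNat
decreasing_by
  simp only [PySem.Int.floordiv_eq_ediv_of_pos (by omega : (0:Int) < 2)]
  omega

def solve_alt (m : Int) : Int :=
  let n0 := PySem.Int.floordiv (m - 1) 2
  let n := if n0 < 0 then 0 else n0
  let M : Mat4 := ((3,4,0,10),(2,3,0,6),(2,3,1,6),(0,0,0,1))
  let I : Mat4 := ((1,0,0,0),(0,1,0,0),(0,0,1,0),(0,0,0,1))
  match powLoop n M I with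
  | (_, _, (r20,r21,r22,r23), _) => r20*7 + r21*4 + r22*4 + r23

-- ===== PRECONDITION & SPEC =====
def Spec_solve (m : Int) (out : Int) : Prop := out = solve_alt m
instance (m : Int) (out : Int) : Decidable (Spec_solve m out) := by unfold Spec_solve; infer_instance

-- ===== CLAIM (what is proved, stated in full; the proofs are below) =====
def Claim_equal_solve : Prop := ∀ (m : Int), Dom_solve m → Spec_solve m (solve m)

-- ===== LEMMAS AND PROOFS =====

/-- matrix-vector action, used only by the proofs -/
def matVec (A : Mat4) (v : Vec4) : Vec4 :=
  match A, v with
  | ((a00,a01,a02,a03),(a10,a11,a12,a13),(a20,a21,a22,a23),(a30,a31,a32,a33)), (x,y,z,w) =>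
    (a00*x+a01*y+a02*z+a03*w, a10*x+a11*y+a12*z+a13*w,
     a20*x+a21*y+a22*z+a23*w, a30*x+a31*y+a32*z+a33*w)

/-- one aggregated loop step on (u, v, s) -/
def stepT (t : Int × Int × Int) : Int × Int × Int :=
  match t with
  | (u, v, s) => (3*u+4*v+10, 2*u+3*v+6, s+2*u+3*v+6)

theorem matVec_mul (A B : Mat4) (v : Vec4) :
    matVec (matMul A B) v = matVec A (matVec B v) := by
  obtain ⟨⟨a00,a01,a02,a03⟩,⟨a10,a11,a12,a13⟩,⟨a20,a21,a22,a23⟩,⟨a30,a31,a32,a33⟩⟩ := A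
  obtain ⟨⟨b00,b01,b02,b03⟩,⟨b10,b11,b12,b13⟩,⟨b20,b21,b22,b23⟩,⟨b30,b31,b32,b33⟩⟩ := B
  obtain ⟨x,y,z,w⟩ := v
  simp only [matMul, matVec, Prod.mk.injEq]
  refine ⟨by ring, by ring, by ring, by ring⟩

theorem matVec_I0 (v : Vec4) :
    matVec ((1,0,0,0),(0,1,0,0),(0,0,1,0),(0,0,0,1)) v = v := by
  obtain ⟨x,y,z,w⟩ := v
  simp only [matVec, Prod.mk.injEq]
  refine ⟨by ring, by ring, by ring, by ring⟩

theorem powLoop_spec (a : Nat) : ∀ (n : Int) (M R : Mat4) (v : Vec4), n.toNat = a →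
    matVec (powLoop n M R) v = matVec R ((matVec M)^[n.toNat] v) := by
  induction a using Nat.strong_induction_on with
  | _ a ih =>
    intro n M R v ha
    rw [powLoop]
    by_cases hn : n > 0
    · simp only [hn, if_true]
      have h2 : (0:Int) < 2 := by omega
      have hfd : PySem.Int.floordiv n 2 = n / 2 := PySem.Int.floordiv_eq_ediv_of_pos h2
      have hmd : PySem.Int.mod n 2 = n % 2 := PySem.Int.mod_eq_emod_of_pos h2
      set k : Nat := (n / 2).toNat with hk
      have hka : k < a := by omega
      have hrec := ih k hka (n/2) (matMul M M)
        (if PySem.Int.mod n 2 == 1 then matMul R M else R) v (by omega)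
      rw [hfd, hrec]
      have hMM : (matVec (matMul M M))^[k] v = (matVec M)^[2*k] v := by
        have : matVec (matMul M M) = (matVec M)^[2] := by
          funext w
          simp [matVec_mul, Function.iterate_succ_apply']
        rw [this, ← Function.iterate_mul]
      by_cases hodd : n % 2 = 1
      · have : (PySem.Int.mod n 2 == 1) = true := by rw [hmd]; simp [hodd]
        simp only [this, if_true]
        rw [hMM, matVec_mul]
        have hnat : n.toNat = 2*k + 1 := by omega
        rw [hnat, Function.iterate_succ_apply]
        rw [← Function.iterate_succ_apply' (matVec M), ← Function.iterate_succ_apply (matVec M)]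
      · have heven : n % 2 = 0 := by omega
        have : (PySem.Int.mod n 2 == 1) = false := by rw [hmd]; simp [heven]
        rw [this, if_neg (by simp), hMM]
        have hnat : n.toNat = 2*k := by omega
        rw [hnat]
    · simp only [hn, if_false]
      have : n.toNat = 0 := by omega
      rw [this, Function.iterate_zero_apply]

theorem matVec_M0 (u v s : Int) :
    matVec ((3,4,0,10),(2,3,0,6),(2,3,1,6),(0,0,0,1)) (u, v, s, 1)
      = (3*u+4*v+10, 2*u+3*v+6, s+2*u+3*v+6, 1) := by
  simp only [matVec, Prod.mk.injEq]
  refine ⟨by ring, by ring, by ring, by ring⟩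

theorem iterate_M0 (k : Nat) : ∀ (u v s : Int),
    (matVec ((3,4,0,10),(2,3,0,6),(2,3,1,6),(0,0,0,1)))^[k] (u, v, s, 1) =
      ((stepT^[k] (u, v, s)).1, (stepT^[k] (u, v, s)).2.1, (stepT^[k] (u, v, s)).2.2, 1) := by
  induction k with
  | zero => intro u v s; simp
  | succ k ih =>
    intro u v s
    rw [Function.iterate_succ_apply, Function.iterate_succ_apply, matVec_M0, ih]
    rfl

theorem solveLoop_eq (a : Nat) : ∀ (m x1 y1 x2 y2 count somme : Int),
    (m - count).toNat = a →
    solveLoop m x1 y1 x2 y2 count somme = (stepT^[(a+1)/2] (x1+x2, y1+y2, somme)).2.2 := by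
  induction a using Nat.strong_induction_on with
  | _ a ih =>
    intro m x1 y1 x2 y2 count somme ha
    rw [solveLoop]
    by_cases h : count < m
    · simp only [h, if_true]
      have ha1 : 1 ≤ a := by omega
      have hlt : (m - (count + 2)).toNat < a := by omega
      rw [ih _ hlt m _ _ _ _ (count + 2) _ rfl]
      have hidx : ((m - (count + 2)).toNat + 1)/2 + 1 = (a + 1)/2 := by omega
      rw [← hidx, Function.iterate_succ_apply]
      have hstep : stepT (x1+x2, y1+y2, somme)
          = ((3*x1+4*y1+5) + (3*x2+4*y2+5), (2*x1+3*y1+3) + (2*x2+3*y2+3),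
             somme + (2*x1+3*y1+3) + (2*x2+3*y2+3)) := by
        simp only [stepT, Prod.mk.injEq]
        refine ⟨by ring, by ring, by ring⟩
      rw [hstep]
    · simp only [h, if_false]
      have : a = 0 := by omega
      subst this
      simp

theorem iterCount (m : Int) :
    (if PySem.Int.floordiv (m-1) 2 < 0 then 0 else PySem.Int.floordiv (m-1) 2).toNat
      = ((m - 2).toNat + 1)/2 := by
  rw [PySem.Int.floordiv_eq_ediv_of_pos (by omega : (0:Int) < 2)]
  split <;> omega

theorem hrow_eval (R : Mat4) :
    R.2.2.1.1*7 + R.2.2.1.2.1*4 + R.2.2.1.2.2.1*4 + R.2.2.1.2.2.2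
      = (matVec R (7, 4, 4, 1)).2.2.1 := by
  obtain ⟨⟨a00,a01,a02,a03⟩,⟨a10,a11,a12,a13⟩,⟨a20,a21,a22,a23⟩,⟨a30,a31,a32,a33⟩⟩ := R
  simp [matVec]

-- ===== VERDICT (by name: the statement is the Claim_ definition above) =====
theorem solve_spec : Claim_equal_solve := by
  intro m _
  unfold Spec_solve solve solve_alt
  simp only []
  rw [hrow_eval, powLoop_spec _ _ _ _ _ rfl, matVec_I0, iterCount, iterate_M0]
  rw [solveLoop_eq ((m - 2).toNat) m 2 1 5 3 2 4 rfl]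
  norm_num
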